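-- pv_equiv track=rewrite | github.com/yasinshaw/leetcode | src/n34.py | _find_last_pos
-- ===== SOURCE A (Python) =====
-- from typing import List
--
-- def _find_last_pos(nums: List[int], target: int) -> int:
--     left = 0
--     right = len(nums) - 1
--     while left < right:
--         mid = left + ((right - left + 1) >> 1)
--         if nums[mid] > target:
--             right = mid - 1
--         else:
--             left = mid
--     return left
-- ===== SOURCE B (Python) =====
-- from typing import List
--
-- def _find_last_pos(nums: List[int], target: int) -> int:
--     # Recursive window (base, size) decomposition: halve the size instead of
--     # tracking a right pointer and a mid formula.
--     def rec(base: int, size: int) -> int: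
--         if size <= 1:
--             return base
--         half = size >> 1
--         if nums[base + half] > target:
--             return rec(base, half)
--         return rec(base + half, size - half)
--     return rec(0, len(nums))
-- ===== Notes on version B (the rewrite author's own statement) =====
-- stated objective: alternative
-- what changed: Replaces the imperative while loop over (left, right) pointers and the mid = left + ((right-left+1)>>1) formula with a recursive helper over a (base, size) window that halves the size, making the same comparisons in the same order.
import Mathlib
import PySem

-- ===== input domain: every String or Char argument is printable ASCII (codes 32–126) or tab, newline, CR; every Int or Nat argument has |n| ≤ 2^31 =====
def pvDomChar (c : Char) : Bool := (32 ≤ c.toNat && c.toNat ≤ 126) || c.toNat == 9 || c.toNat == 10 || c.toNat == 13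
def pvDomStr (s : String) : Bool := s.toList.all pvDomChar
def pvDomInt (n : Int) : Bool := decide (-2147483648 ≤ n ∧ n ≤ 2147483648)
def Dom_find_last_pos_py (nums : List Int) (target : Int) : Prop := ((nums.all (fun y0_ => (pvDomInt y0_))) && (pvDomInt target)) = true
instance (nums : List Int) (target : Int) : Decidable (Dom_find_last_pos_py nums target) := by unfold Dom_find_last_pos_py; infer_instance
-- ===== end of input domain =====

-- B replaces the while loop over (left, right) pointers with a recursion over a
-- window (base, size), halving the size; objective: alternative decomposition.

-- ===== PORT A =====
-- while left < right: mid = left + ((right-left+1) >> 1); …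
-- '>> 1' is applied to a value ≥ 2 here, where it equals Lean's Int division by 2.
-- nums[mid] always has 0 ≤ mid ≤ right < nums.length in the loop, so pyGet? is
-- always 'some'; the .getD 0 default is never used.
def find_last_pos_pyLoop (nums : List Int) (target : Int) (left right : Int) : Int :=
  if h : left < right then
    let mid := left + (right - left + 1) / 2
    if (PySem.List.pyGet? nums mid).getD 0 > target then
      find_last_pos_pyLoop nums target left (mid - 1)
    else
      find_last_pos_pyLoop nums target mid right
  else
    left
  termination_by (right - left).toNat
  decreasing_by all_goals omega

def find_last_pos_py (nums : List Int) (target : Int) : Int :=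
  find_last_pos_pyLoop nums target 0 ((nums.length : Int) - 1)

-- ===== PORT B =====
def find_last_pos_pyRec (nums : List Int) (target : Int) (base : Int) (size : Nat) : Int :=
  if size ≤ 1 then base
  else
    let half := size / 2  -- size >> 1
    if (PySem.List.pyGet? nums (base + (half : Int))).getD 0 > target then
      find_last_pos_pyRec nums target base half
    else
      find_last_pos_pyRec nums target (base + (half : Int)) (size - half)
  termination_by size
  decreasing_by all_goals omega

def find_last_pos_py_alt (nums : List Int) (target : Int) : Int :=
  find_last_pos_pyRec nums target 0 nums.length

-- ===== PRECONDITION & SPEC =====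
def Spec_find_last_pos_py (nums : List Int) (target : Int) (out : Int) : Prop := out = find_last_pos_py_alt nums target
instance (nums : List Int) (target : Int) (out : Int) : Decidable (Spec_find_last_pos_py nums target out) := by unfold Spec_find_last_pos_py; infer_instance

-- ===== CLAIM (what is proved, stated in full; the proofs are below) =====
def Claim_equal_find_last_pos_py : Prop := ∀ (nums : List Int) (target : Int), Dom_find_last_pos_py nums target → Spec_find_last_pos_py nums target (find_last_pos_py nums target)

-- ===== LEMMAS AND PROOFS =====

-- The loop on [left, right] computes the same value as the recursion on the
-- window (left, size) with size = right - left + 1.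
theorem loop_eq_rec (nums : List Int) (target : Int) :
    ∀ (s : Nat) (left right : Int), left ≤ right → (right - left + 1).toNat = s →
      find_last_pos_pyLoop nums target left right = find_last_pos_pyRec nums target left s := by
  intro s
  induction s using Nat.strong_induction_on with
  | _ s ih =>
    intro left right hle hs
    rw [find_last_pos_pyLoop, find_last_pos_pyRec]
    by_cases h : left < right
    · have hs2 : ¬ s ≤ 1 := by omega
      have hmid : left + (right - left + 1) / 2 = left + ((s / 2 : Nat) : Int) := by omega
      simp only [dif_pos h, if_neg hs2, hmid]
      split
      · exact ih (s / 2) (by omega) left (left + ((s / 2 : Nat) : Int) - 1) (by omega) (by omega)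
      · exact ih (s - s / 2) (by omega) (left + ((s / 2 : Nat) : Int)) right (by omega) (by omega)
    · have h1 : left = right := le_antisymm hle (not_lt.mp h)
      have hs1 : s ≤ 1 := by omega
      simp [h, hs1]

-- ===== VERDICT (by name: the statement is the Claim_ definition above) =====
theorem find_last_pos_py_spec : Claim_equal_find_last_pos_py := by
  intro nums target _
  unfold Spec_find_last_pos_py find_last_pos_py find_last_pos_py_alt
  rcases Nat.eq_zero_or_pos nums.length with hn | hn
  · rw [find_last_pos_pyLoop, find_last_pos_pyRec]
    simp [hn]
  · have := loop_eq_rec nums target nums.length 0 ((nums.length : Int) - 1)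
      (by omega) (by omega)
    simpa using this
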